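-- pv_equiv track=rewrite | github.com/jonathonreilly/toy-physics | scripts/frontier_s3_discrete_continuum.py | boundary_sites
-- ===== SOURCE A (Python) =====
-- def boundary_sites(sites_set: set, all_sites: list) -> list:
--     """Sites that have at least one missing Z^3 neighbor."""
--     directions = [(1, 0, 0), (-1, 0, 0), (0, 1, 0), (0, -1, 0), (0, 0, 1), (0, 0, -1)]
--     bdry = []
--     for s in all_sites:
--         for d in directions:
--             nb = (s[0] + d[0], s[1] + d[1], s[2] + d[2])
--             if nb not in sites_set:
--                 bdry.append(s)
--                 break
--     return bdry
-- ===== SOURCE B (Python) =====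
-- def boundary_sites(sites_set: set, all_sites: list) -> list:
--     """Sites that have at least one missing Z^3 neighbor."""
--     directions = [(1, 0, 0), (-1, 0, 0), (0, 1, 0), (0, -1, 0), (0, 0, 1), (0, 0, -1)]
--     # interior points = points whose neighbor in EVERY direction is present:
--     # intersect the six translates of sites_set.
--     shifted = [{(q[0] - dx, q[1] - dy, q[2] - dz) for q in sites_set}
--                for (dx, dy, dz) in directions]
--     interior = set.intersection(*shifted)
--     return [s for s in all_sites if s not in interior]
-- ===== Notes on version B (the rewrite author's own statement) =====
-- stated objective: alternative
-- what changed: Instead of probing all six neighbors of each site inside the output loop, B builds the interior set once as the intersection of the six coordinate-translates of sites_set and then filters all_sites by a single membership test.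
import Mathlib
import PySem

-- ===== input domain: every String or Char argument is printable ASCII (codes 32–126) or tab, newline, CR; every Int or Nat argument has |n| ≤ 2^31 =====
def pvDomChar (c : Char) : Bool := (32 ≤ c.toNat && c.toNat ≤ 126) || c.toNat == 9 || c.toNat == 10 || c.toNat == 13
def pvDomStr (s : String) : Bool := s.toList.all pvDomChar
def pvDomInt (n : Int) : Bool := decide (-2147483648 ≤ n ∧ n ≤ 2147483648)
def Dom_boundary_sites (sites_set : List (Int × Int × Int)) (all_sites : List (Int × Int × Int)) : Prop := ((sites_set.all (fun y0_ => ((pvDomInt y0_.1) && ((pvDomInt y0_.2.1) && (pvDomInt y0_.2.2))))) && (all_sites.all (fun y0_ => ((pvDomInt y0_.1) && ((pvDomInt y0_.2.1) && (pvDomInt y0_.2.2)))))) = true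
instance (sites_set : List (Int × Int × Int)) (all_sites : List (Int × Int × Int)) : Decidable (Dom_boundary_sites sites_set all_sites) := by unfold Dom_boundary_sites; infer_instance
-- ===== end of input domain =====

-- B replaces the per-site six-neighbor probe by one intersection of the six translates
-- of sites_set (the interior set) followed by a single membership filter over all_sites.

-- ===== PORT A =====
def pvDirections : List (Int × Int × Int) :=
  [(1, 0, 0), (-1, 0, 0), (0, 1, 0), (0, -1, 0), (0, 0, 1), (0, 0, -1)]

-- the inner 'for d in directions: … break' loop of A
def pvProbe (sites_set : List (Int × Int × Int)) (s : Int × Int × Int) :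
    List (Int × Int × Int) → Bool
  | [] => false
  | d :: ds =>
      if (s.1 + d.1, s.2.1 + d.2.1, s.2.2 + d.2.2) ∈ sites_set then
        pvProbe sites_set s ds
      else true

def boundary_sites (sites_set : List (Int × Int × Int)) (all_sites : List (Int × Int × Int)) : List (Int × Int × Int) :=
  all_sites.foldl
    (fun bdry s => if pvProbe sites_set s pvDirections then bdry ++ [s] else bdry)
    []

-- ===== PORT B =====
-- {(q[0]-dx, q[1]-dy, q[2]-dz) for q in sites_set}
def pvShift (sites_set : List (Int × Int × Int)) (d : Int × Int × Int) :
    PySem.Set (Int × Int × Int) :=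
  PySem.Set.ofList (sites_set.map (fun q => (q.1 - d.1, q.2.1 - d.2.1, q.2.2 - d.2.2)))

def boundary_sites_alt (sites_set : List (Int × Int × Int)) (all_sites : List (Int × Int × Int)) : List (Int × Int × Int) :=
  let shifted := pvDirections.map (pvShift sites_set)
  -- set.intersection(*shifted); shifted is nonempty (six directions)
  let interior : PySem.Set (Int × Int × Int) :=
    match shifted with
    | [] => PySem.Set.empty
    | h :: t => t.foldl PySem.Set.inter h
  all_sites.filter (fun s => !(PySem.Set.contains interior s))

-- ===== PRECONDITION & SPEC =====
def Spec_boundary_sites (sites_set : List (Int × Int × Int)) (all_sites : List (Int × Int × Int)) (out : List (Int × Int × Int)) : Prop := out = boundary_sites_alt sites_set all_sites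
instance (sites_set : List (Int × Int × Int)) (all_sites : List (Int × Int × Int)) (out : List (Int × Int × Int)) : Decidable (Spec_boundary_sites sites_set all_sites out) := by unfold Spec_boundary_sites; infer_instance

-- ===== CLAIM (what is proved, stated in full; the proofs are below) =====
def Claim_equal_boundary_sites : Prop := ∀ (sites_set : List (Int × Int × Int)) (all_sites : List (Int × Int × Int)), Dom_boundary_sites sites_set all_sites → Spec_boundary_sites sites_set all_sites (boundary_sites sites_set all_sites)

-- ===== LEMMAS AND PROOFS =====

-- membership in a translate of sites_set = the neighbor in direction d is present
theorem mem_pvShift (sites_set : List (Int × Int × Int)) (d s : Int × Int × Int) :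
    s ∈ pvShift sites_set d ↔ (s.1 + d.1, s.2.1 + d.2.1, s.2.2 + d.2.2) ∈ sites_set := by
  simp only [pvShift, PySem.Set.mem_ofList, List.mem_map]
  constructor
  · rintro ⟨q, hq, rfl⟩
    obtain ⟨a, b, c⟩ := q
    simpa using hq
  · intro h
    exact ⟨_, h, by obtain ⟨a, b, c⟩ := s; simp⟩

-- A's inner loop returns true iff some direction's neighbor is missing
theorem pvProbe_iff (sites_set : List (Int × Int × Int)) (s : Int × Int × Int)
    (ds : List (Int × Int × Int)) :
    pvProbe sites_set s ds = true ↔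
      ∃ d ∈ ds, (s.1 + d.1, s.2.1 + d.2.1, s.2.2 + d.2.2) ∉ sites_set := by
  induction ds with
  | nil => simp [pvProbe]
  | cons d ds ih =>
      by_cases h : (s.1 + d.1, s.2.1 + d.2.1, s.2.2 + d.2.2) ∈ sites_set
      · simp [pvProbe, h, ih]
      · simp [pvProbe, h]

theorem pvProbe_eq_not_contains (sites_set : List (Int × Int × Int)) (s : Int × Int × Int) :
    pvProbe sites_set s pvDirections =
      !(PySem.Set.contains
          ((pvDirections.map (pvShift sites_set)).tail.foldl PySem.Set.inter
            (pvShift sites_set (1, 0, 0))) s) := by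
  rw [Bool.eq_iff_iff, pvProbe_iff]
  simp only [pvDirections, List.map, List.tail, List.foldl, List.mem_cons, List.not_mem_nil,
    or_false, exists_eq_or_imp, exists_eq_left]
  simp [PySem.Set.mem_inter, mem_pvShift]
  tauto

-- ===== VERDICT (by name: the statement is the Claim_ definition above) =====
theorem boundary_sites_spec : Claim_equal_boundary_sites := by
  intro sites_set all_sites _
  unfold Spec_boundary_sites boundary_sites boundary_sites_alt
  rw [PySem.List.foldl_append_if_eq_filter]
  simp only [List.nil_append]
  apply List.filter_congr
  intro s _
  rw [pvProbe_eq_not_contains]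
  rfl
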